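-- pv_equiv track=rewrite | github.com/oriing/BaekjoonOJ | 1537.py | Prod3
-- ===== SOURCE A (Python) =====
-- def Prod(n):
--     ans=1
--     for i in tuple(map(int,str(n))):
--         ans*=i
--     return ans
--
-- def Prod3(n):
--     if n<1000:
--         return Prod(n)
--     p=sorted(tuple(map(int,str(n))))[-3:]
--     ans=1
--     for i in p:
--         ans*=i
--     return ans
-- ===== SOURCE B (Python) =====
-- def Prod3(n):
--     t1 = t2 = t3 = -1
--     for ch in str(n):
--         d = int(ch)
--         if d > t1:
--             t1 = d
--             if t1 > t2:
--                 t1, t2 = t2, t1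
--             if t2 > t3:
--                 t2, t3 = t3, t2
--     ans = 1
--     for t in (t1, t2, t3):
--         if t >= 0:
--             ans *= t
--     return ans
-- ===== Notes on version B (the rewrite author's own statement) =====
-- stated objective: alternative
-- what changed: Replaced A's sort-then-slice (plus the redundant n<1000 all-digits branch and its Prod helper) by a single pass over the digits that maintains the three largest digits in three running slots, multiplying the filled slots at the end.
import Mathlib
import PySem

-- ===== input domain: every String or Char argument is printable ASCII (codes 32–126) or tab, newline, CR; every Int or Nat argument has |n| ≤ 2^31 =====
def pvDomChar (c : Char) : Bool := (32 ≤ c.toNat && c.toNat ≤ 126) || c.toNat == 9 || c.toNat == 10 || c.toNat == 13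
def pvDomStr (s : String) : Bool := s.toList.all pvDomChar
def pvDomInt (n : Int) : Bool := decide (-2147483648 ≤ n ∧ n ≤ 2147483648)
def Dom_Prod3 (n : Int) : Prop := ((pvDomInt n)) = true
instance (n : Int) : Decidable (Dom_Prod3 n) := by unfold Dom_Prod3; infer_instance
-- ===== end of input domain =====

-- B replaces A's sort-then-slice (and its redundant n<1000 branch with the Prod helper) by a
-- single pass keeping the three largest digits in three running slots (objective: alternative).

-- ===== PORT A =====
-- int(c) for a single character c, as both Pythons apply it to the characters of str(n);
-- exact on every input admitted by Pre_ (there every character of str(n) is a digit,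
-- where int(c) returns normally; for n < 0 Python's int('-') raises, excluded by Pre_).
def pyIntChar (c : Char) : Int := (PySem.Int.ofChars? [c]).getD 0

-- the list map(int, str(n)) shared verbatim by both Pythons
def pyDigits (n : Int) : List Int := (PySem.Int.toChars n).map pyIntChar

-- helper Prod of A: ans=1; for i in tuple(map(int,str(n))): ans*=i
def ProdA (n : Int) : Int := (pyDigits n).foldl (fun ans i => ans * i) 1

def Prod3 (n : Int) : Int :=
  if n < 1000 then ProdA n
  else
    let p := PySem.List.slice (PySem.List.sorted (pyDigits n) (fun x => x) false) (some (-3)) none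
    p.foldl (fun ans i => ans * i) 1

-- ===== PORT B =====
-- the body of B's digit loop: if d > t1: t1 = d; if t1 > t2: swap; if t2 > t3: swap
def bStep : Int × Int × Int → Int → Int × Int × Int
  | (t1, t2, t3), d =>
    if d > t1 then
      let t1 := d
      let (t1, t2) := if t1 > t2 then (t2, t1) else (t1, t2)
      let (t2, t3) := if t2 > t3 then (t3, t2) else (t2, t3)
      (t1, t2, t3)
    else (t1, t2, t3)

def Prod3_alt (n : Int) : Int :=
  let t := ((PySem.Int.toChars n).map pyIntChar).foldl bStep (-1, -1, -1)
  [t.1, t.2.1, t.2.2].foldl (fun ans x => if 0 ≤ x then ans * x else ans) 1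

-- ===== PRECONDITION & SPEC =====
-- Pre_ excludes exactly n < 0: there str(n) starts with '-' and A's map(int, str(n)) raises ValueError.
def Pre_Prod3 (n : Int) : Prop := 0 ≤ n
instance (n : Int) : Decidable (Pre_Prod3 n) := by unfold Pre_Prod3; infer_instance
def pvWitness_Prod3 : Int := (54321)

def Spec_Prod3 (n : Int) (out : Int) : Prop := out = Prod3_alt n
instance (n : Int) (out : Int) : Decidable (Spec_Prod3 n out) := by unfold Spec_Prod3; infer_instance

-- ===== CLAIM (what is proved, stated in full; the proofs are below) =====
def Claim_equal_Prod3 : Prop := ∀ (n : Int), Dom_Prod3 n → Pre_Prod3 n → Spec_Prod3 n (Prod3 n)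

-- ===== LEMMAS AND PROOFS =====

-- descending order as a relation
def geR (a b : Int) : Prop := b ≤ a

-- insert into a descending-sorted list
def insD (d : Int) : List Int → List Int
  | [] => [d]
  | x :: xs => if x ≤ d then d :: x :: xs else x :: insD d xs

-- insertion sort, descending, left to right
def sortD (L : List Int) : List Int := L.foldl (fun acc d => insD d acc) []

-- the three slots (t1,t2,t3) read off a descending list: t3 = head, pads are -1
def slots (s : List Int) : Int × Int × Int := (s.getD 2 (-1), s.getD 1 (-1), s.getD 0 (-1))

-- closed form of bStep on an ordered triple
def stepC (t1 t2 t3 d : Int) : Int × Int × Int :=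
  if d ≤ t1 then (t1, t2, t3)
  else if d ≤ t2 then (d, t2, t3)
  else if d ≤ t3 then (t2, d, t3)
  else (t2, t3, d)

theorem bStep_eq_stepC (t1 t2 t3 d : Int) (_h12 : t1 ≤ t2) (h23 : t2 ≤ t3) :
    bStep (t1, t2, t3) d = stepC t1 t2 t3 d := by
  simp only [bStep, stepC]
  split_ifs <;> simp_all <;> omega

theorem perm_insD (d : Int) (s : List Int) : (insD d s).Perm (d :: s) := by
  induction s with
  | nil => simp [insD]
  | cons x xs ih =>
    simp only [insD]
    split_ifs with h
    · exact List.Perm.refl _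
    · exact (List.Perm.cons x ih).trans (List.Perm.swap d x xs)

theorem mem_insD {y d : Int} {s : List Int} (h : y ∈ insD d s) : y = d ∨ y ∈ s := by
  have := (perm_insD d s).mem_iff.mp h
  simpa using this

theorem sorted_insD {d : Int} {s : List Int} (h : s.Pairwise geR) : (insD d s).Pairwise geR := by
  induction s with
  | nil => simp [insD]
  | cons x xs ih =>
    rw [List.pairwise_cons] at h
    simp only [insD]
    split_ifs with hx
    · rw [List.pairwise_cons]
      constructor
      · intro b hb
        rcases List.mem_cons.mp hb with hb | hb
        · subst hb; exact hx
        · exact le_trans (h.1 b hb) hx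
      · exact List.pairwise_cons.mpr h
    · rw [List.pairwise_cons]
      refine ⟨?_, ih h.2⟩
      intro b hb
      rcases mem_insD hb with hb | hb
      · simp only [hb, geR]; omega
      · exact h.1 b hb

theorem sorted_sortD_aux (L : List Int) (s : List Int) (hs : s.Pairwise geR) :
    (L.foldl (fun acc d => insD d acc) s).Pairwise geR := by
  induction L generalizing s with
  | nil => simpa
  | cons d L ih => exact ih _ (sorted_insD hs)

theorem perm_sortD_aux (L : List Int) (s : List Int) :
    (L.foldl (fun acc d => insD d acc) s).Perm (L ++ s) := by
  induction L generalizing s with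
  | nil => simp
  | cons d L ih =>
    simp only [List.foldl_cons]
    refine (ih (insD d s)).trans ?_
    exact (List.Perm.append_left L (perm_insD d s)).trans List.perm_middle

theorem sorted_sortD (L : List Int) : (sortD L).Pairwise geR :=
  sorted_sortD_aux L [] (by simp)

theorem perm_sortD (L : List Int) : (sortD L).Perm L := by
  simpa using perm_sortD_aux L []

-- padded ordering facts
theorem getD0_le {x : Int} {xs : List Int} (h : (x :: xs).Pairwise geR) (hx : 0 ≤ x) :
    xs.getD 0 (-1) ≤ x := by
  cases xs with
  | nil => simp; omega
  | cons a t =>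
    rw [List.pairwise_cons] at h
    simpa using h.1 a (by simp)

theorem getD_chain {s : List Int} (h : s.Pairwise geR) (hpos : ∀ y ∈ s, 0 ≤ y) :
    s.getD 1 (-1) ≤ s.getD 0 (-1) ∧ s.getD 2 (-1) ≤ s.getD 1 (-1) ∧ -1 ≤ s.getD 2 (-1) := by
  match s with
  | [] => simp
  | [a] =>
    have := hpos a (by simp); simp; omega
  | [a, b] =>
    rw [List.pairwise_cons] at h
    have h1 : b ≤ a := h.1 b (by simp)
    have := hpos b (by simp)
    simp; omega
  | a :: b :: c :: t =>
    rw [List.pairwise_cons] at h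
    have h1 : b ≤ a := h.1 b (by simp)
    have h2 : c ≤ b := by
      have hs2 := h.2
      rw [List.pairwise_cons] at hs2
      exact hs2.1 c (by simp)
    have := hpos c (by simp)
    simp; omega

-- the stepC arithmetic used in the recursive case of slots_insD
theorem stepC_shift (a2 a1 a0 x d : Int) (h21 : a2 ≤ a1) (h10 : a1 ≤ a0) (h0x : a0 ≤ x)
    (hdx : d < x) :
    ((stepC a2 a1 a0 d).2.1, (stepC a2 a1 a0 d).2.2, x) = stepC a1 a0 x d := by
  simp only [stepC]
  split_ifs <;> simp_all <;> omega

theorem slots_insD {s : List Int} (d : Int) (hs : s.Pairwise geR) (hpos : ∀ y ∈ s, 0 ≤ y)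
    (hd : 0 ≤ d) :
    slots (insD d s) = stepC (s.getD 2 (-1)) (s.getD 1 (-1)) (s.getD 0 (-1)) d := by
  induction s with
  | nil =>
    simp [insD, slots, stepC, show ¬(d ≤ (-1 : Int)) from by omega]
  | cons x xs ih =>
    have hx : 0 ≤ x := hpos x (by simp)
    rw [List.pairwise_cons] at hs
    simp only [insD]
    split_ifs with hxd
    · -- inserted at the front: d is the new maximum
      rcases getD_chain (List.pairwise_cons.mpr hs) (by exact hpos) with ⟨c1, c2, c3⟩
      simp only [slots, stepC]
      cases xs with
      | nil => simp at c1 c2 c3 ⊢; split_ifs <;> simp_all <;> omega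
      | cons a t =>
        cases t with
        | nil => simp at c1 c2 c3 ⊢; split_ifs <;> simp_all <;> omega
        | cons b u => simp at c1 c2 c3 ⊢; split_ifs <;> simp_all <;> omega
    · -- recursive case
      have hxd : d < x := not_le.mp hxd
      have ih' := ih hs.2 (fun y hy => hpos y (by simp [hy]))
      rcases getD_chain hs.2 (fun y hy => hpos y (by simp [hy])) with ⟨c1, c2, c3⟩
      have h0x : xs.getD 0 (-1) ≤ x := getD0_le (List.pairwise_cons.mpr hs) hx
      have hshift := stepC_shift (xs.getD 2 (-1)) (xs.getD 1 (-1)) (xs.getD 0 (-1)) x d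
        c2 c1 h0x hxd
      have hne : insD d xs ≠ [] := by
        intro hnil
        have := (perm_insD d xs).symm.mem_iff.mp (show d ∈ d :: xs by simp)
        rw [hnil] at this; simp at this
      -- slots (x :: insD d xs) in terms of slots (insD d xs)
      have hgoal : slots (x :: insD d xs)
          = ((slots (insD d xs)).2.1, (slots (insD d xs)).2.2, x) := by
        cases h : insD d xs with
        | nil => exact absurd h hne
        | cons w ws => simp [slots]
      rw [hgoal, ih']
      simp only [slots] at *
      exact hshift

-- main loop invariant: folding bStep from the slots of s computes the slots of inserting L into s
theorem fold_bStep_eq (L : List Int) (s : List Int) (hs : s.Pairwise geR)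
    (hpos : ∀ y ∈ s, 0 ≤ y) (hL : ∀ y ∈ L, 0 ≤ y) :
    L.foldl bStep (slots s) = slots (L.foldl (fun acc d => insD d acc) s) := by
  induction L generalizing s with
  | nil => simp
  | cons d L ih =>
    have hd : 0 ≤ d := hL d (by simp)
    rcases getD_chain hs hpos with ⟨c1, c2, _⟩
    have h1 : bStep (slots s) d = slots (insD d s) := by
      have := bStep_eq_stepC (s.getD 2 (-1)) (s.getD 1 (-1)) (s.getD 0 (-1)) d c2 c1
      rw [slots, this, ← slots_insD d hs hpos hd]
    simp only [List.foldl_cons, h1]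
    exact ih (insD d s) (sorted_insD hs)
      (fun y hy => (mem_insD hy).elim (fun h => h ▸ hd) (hpos y))
      (fun y hy => hL y (by simp [hy]))

-- B's final product over the slots equals the product of the three largest elements
theorem prod_slots (s : List Int) (hpos : ∀ y ∈ s, 0 ≤ y) :
    [(slots s).1, (slots s).2.1, (slots s).2.2].foldl
        (fun ans x => if 0 ≤ x then ans * x else ans) 1
      = (s.take 3).prod := by
  match s with
  | [] => simp [slots]
  | [a] =>
    have ha := hpos a (by simp)
    simp [slots, ha]
  | [a, b] =>
    have ha := hpos a (by simp)
    have hb := hpos b (by simp)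
    simp [slots, ha, hb]
    ring
  | a :: b :: c :: t =>
    have ha := hpos a (by simp)
    have hb := hpos b (by simp)
    have hc := hpos c (by simp)
    simp [slots, ha, hb, hc]
    ring

-- PySem's ascending sort is the reverse of sortD
theorem pySorted_eq_reverse_sortD (L : List Int) :
    PySem.List.sorted L (fun x => x) false = (sortD L).reverse := by
  apply PySem.List.sorted_id_eq_of_perm_of_pairwise
  · exact (List.reverse_perm _).trans (perm_sortD L)
  · rw [List.pairwise_reverse]
    exact sorted_sortD L

-- every character str(n) produces for n ≥ 0 maps to a nonnegative int
theorem mem_toDigitsCore {f : Nat} : ∀ {n : Nat} {acc : List Char} {c : Char},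
    c ∈ Nat.toDigitsCore 10 f n acc → c ∈ acc ∨ ∃ k : Nat, k < 10 ∧ c = Nat.digitChar k := by
  induction f with
  | zero => intro n acc c h; simp only [Nat.toDigitsCore] at h; exact Or.inl h
  | succ f ih =>
    intro n acc c h
    simp only [Nat.toDigitsCore] at h
    by_cases h0 : n / 10 = 0
    · rw [if_pos h0] at h
      rcases List.mem_cons.mp h with h | h
      · exact Or.inr ⟨n % 10, Nat.mod_lt _ (by norm_num), h⟩
      · exact Or.inl h
    · rw [if_neg h0] at h
      rcases ih h with h | h
      · rcases List.mem_cons.mp h with h | h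
        · exact Or.inr ⟨n % 10, Nat.mod_lt _ (by norm_num), h⟩
        · exact Or.inl h
      · exact Or.inr h

theorem pyIntChar_digitChar_nonneg (k : Nat) (hk : k < 10) : 0 ≤ pyIntChar (Nat.digitChar k) := by
  interval_cases k <;> decide

theorem pyDigits_nonneg (n : Int) (hn : 0 ≤ n) : ∀ y ∈ pyDigits n, 0 ≤ y := by
  intro y hy
  simp only [pyDigits, List.mem_map] at hy
  obtain ⟨c, hc, rfl⟩ := hy
  rw [PySem.Int.toChars, if_neg (by omega)] at hc
  rw [Nat.toDigits] at hc
  rcases mem_toDigitsCore hc with h | ⟨k, hk, rfl⟩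
  · simp at h
  · exact pyIntChar_digitChar_nonneg k (by omega)

theorem length_pyDigits_le (n : Int) (hn : 0 ≤ n) (h1000 : n < 1000) :
    (pyDigits n).length ≤ 3 := by
  simp only [pyDigits, List.length_map]
  rw [PySem.Int.toChars, if_neg (by omega)]
  exact Nat.toDigits_length 10 n.toNat 3 (by norm_num) (by omega)

theorem foldl_bStep_slots (L : List Int) (hL : ∀ y ∈ L, 0 ≤ y) :
    L.foldl bStep (-1, -1, -1) = slots (sortD L) := by
  rw [show ((-1 : Int), (-1 : Int), (-1 : Int)) = slots [] by simp [slots]]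
  exact fold_bStep_eq L [] (by simp) (by simp) hL

theorem Prod3_alt_eq_take3 (n : Int) (hn : 0 ≤ n) :
    Prod3_alt n = ((sortD (pyDigits n)).take 3).prod := by
  simp only [Prod3_alt]
  rw [show (PySem.Int.toChars n).map pyIntChar = pyDigits n from rfl]
  rw [foldl_bStep_slots (pyDigits n) (pyDigits_nonneg n hn)]
  exact prod_slots (sortD (pyDigits n))
    (fun y hy => pyDigits_nonneg n hn y ((perm_sortD _).mem_iff.mp hy))

theorem foldl_mul_eq_prod (L : List Int) : L.foldl (fun ans i => ans * i) 1 = L.prod := by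
  rw [List.prod_eq_foldl]

-- ===== VERDICT (by name: the statement is the Claim_ definition above) =====
theorem Prod3_spec : Claim_equal_Prod3 := by
  intro n _ hn
  unfold Spec_Prod3
  unfold Pre_Prod3 at hn
  rw [Prod3_alt_eq_take3 n hn]
  unfold Prod3
  split_ifs with h1000
  · -- n < 1000: at most 3 digits, the three largest are all of them
    have hlen : (pyDigits n).length ≤ 3 := length_pyDigits_le n hn h1000
    have hlen' : (sortD (pyDigits n)).length ≤ 3 := by
      rw [(perm_sortD _).length_eq]; exact hlen
    rw [List.take_of_length_le hlen']
    rw [ProdA, foldl_mul_eq_prod]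
    exact ((perm_sortD (pyDigits n)).prod_eq).symm
  · -- n ≥ 1000: sorted(...)[-3:] is the last three of the ascending sort
    rw [pySorted_eq_reverse_sortD, PySem.List.slice_from_neg_ofNat _ 3 (by omega),
      foldl_mul_eq_prod, List.length_reverse, List.drop_reverse, List.prod_reverse]
    generalize sortD (pyDigits n) = s
    by_cases hs3 : 3 ≤ s.length
    · congr 2
      omega
    · rw [show s.length - (s.length - 3) = s.length from by omega, List.take_length,
        List.take_of_length_le (by omega)]
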